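-- pv_equiv track=rewrite | github.com/ejaszewski/ruthless | util/board_cosnt_gen.py | up_right
-- ===== SOURCE A (Python) =====
-- def up_right(pos):
--     x = pos // 8
--     y = pos % 8
--     bs = ''
--     for i in range(0, 8):
--         for j in range(0, 8):
--             if x - i > 0 and (x - i == j - y):
--                 bs += '1'
--             else:
--                 bs += '0'
--         # bs += '\n'
--     return bs
-- ===== SOURCE B (Python) =====
-- def up_right(pos):
--     # Single 8-row pass: in row i the only cell A can mark is column j = x - i + y,
--     # so build each row directly instead of testing all 64 cells.
--     x = pos // 8
--     y = pos % 8
--     rows = []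
--     for i in range(8):
--         j = x - i + y
--         if x - i > 0 and 0 <= j < 8:
--             rows.append('0' * j + '1' + '0' * (7 - j))
--         else:
--             rows.append('0' * 8)
--     return ''.join(rows)
-- ===== Notes on version B (the rewrite author's own statement) =====
-- stated objective: alternative
-- what changed: Replaces the nested scan that tests every board cell for x-i==j-y with a single pass over the rows that computes the marked column j=x-i+y arithmetically and builds each row string directly.
import Mathlib
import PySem

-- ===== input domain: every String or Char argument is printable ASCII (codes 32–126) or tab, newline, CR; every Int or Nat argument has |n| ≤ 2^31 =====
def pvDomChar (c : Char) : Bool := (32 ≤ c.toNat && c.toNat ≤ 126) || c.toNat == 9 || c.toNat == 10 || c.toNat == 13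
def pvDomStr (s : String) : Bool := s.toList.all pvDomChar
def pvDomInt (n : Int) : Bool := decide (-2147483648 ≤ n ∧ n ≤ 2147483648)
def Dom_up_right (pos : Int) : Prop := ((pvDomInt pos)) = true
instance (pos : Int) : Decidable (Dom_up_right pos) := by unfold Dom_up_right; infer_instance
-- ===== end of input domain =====

-- B replaces A's nested per-cell scan with a single per-row pass that computes the
-- marked column j = x - i + y arithmetically and builds each row directly.


-- ===== PORT A =====
-- bs is accumulated as a List Char ('' ↦ [], bs += c ↦ bs ++ [c]) and wrapped once at the end.
def up_right (pos : Int) : String :=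
  let x := PySem.Int.floordiv pos 8
  let y := PySem.Int.mod pos 8
  let bs : List Char :=
    (PySem.List.pyRange 0 8 1).foldl (fun bs i =>
      (PySem.List.pyRange 0 8 1).foldl (fun bs j =>
        if x - i > 0 ∧ x - i = j - y then bs ++ ['1'] else bs ++ ['0']) bs) []
  String.ofList bs

-- ===== PORT B =====
-- one row of the board: '0'*j + '1' + '0'*(7-j) when the guard holds, else '0'*8
def upRightRow (x y i : Int) : List Char :=
  let j := x - i + y
  if x - i > 0 ∧ 0 ≤ j ∧ j < 8 then
    List.replicate j.toNat '0' ++ '1' :: List.replicate (7 - j).toNat '0'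
  else
    List.replicate 8 '0'

def up_right_alt (pos : Int) : String :=
  let x := PySem.Int.floordiv pos 8
  let y := PySem.Int.mod pos 8
  let rows : List (List Char) :=
    (PySem.List.pyRange 0 8 1).foldl (fun rows i => rows ++ [upRightRow x y i]) []
  String.ofList (PySem.Chars.join [] rows)

-- ===== PRECONDITION & SPEC =====
def Spec_up_right (pos : Int) (out : String) : Prop := out = up_right_alt pos
instance (pos : Int) (out : String) : Decidable (Spec_up_right pos out) := by unfold Spec_up_right; infer_instance

-- ===== CLAIM (what is proved, stated in full; the proofs are below) =====
def Claim_equal_up_right : Prop := ∀ (pos : Int), Dom_up_right pos → Spec_up_right pos (up_right pos)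

-- ===== LEMMAS AND PROOFS =====

-- ''.join over char-list rows is flatten
theorem join_nil_eq_flatten (ls : List (List Char)) : PySem.Chars.join [] ls = ls.flatten := by
  induction ls with
  | nil => rfl
  | cons h t ih =>
    cases t with
    | nil => simp [PySem.Chars.join, List.intercalate]
    | cons a b =>
      simp only [PySem.Chars.join, List.intercalate, List.intersperse] at *
      simp_all [List.flatten]

-- one row of A's scan equals B's arithmetic row (d = x - i)
theorem row_eq (d y : Int) (h0 : 0 ≤ y) (h1 : y < 8) :
    (PySem.List.pyRange 0 8 1).map (fun j => if d > 0 ∧ d = j - y then '1' else '0')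
      = if d > 0 ∧ 0 ≤ d + y ∧ d + y < 8 then
          List.replicate (d + y).toNat '0' ++ '1' :: List.replicate (7 - (d + y)).toNat '0'
        else
          List.replicate 8 '0' := by
  by_cases hd : d > 0 ∧ 0 ≤ d + y ∧ d + y < 8
  · rw [if_pos hd]
    have h2 : 1 ≤ d := hd.1
    have h3 : d ≤ 7 := by omega
    interval_cases d <;> interval_cases y <;> first | decide | omega
  · rw [if_neg hd]
    have hz : ∀ j ∈ PySem.List.pyRange 0 8 1,
        (if d > 0 ∧ d = j - y then '1' else '0') = (fun (_ : Int) => '0') j := by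
      intro j hj
      rw [PySem.List.mem_pyRange_one] at hj
      rw [if_neg]
      rintro ⟨p, q⟩
      exact hd ⟨p, by omega⟩
    rw [List.map_congr_left hz]
    decide

theorem row_eq' (x y i : Int) (h0 : 0 ≤ y) (h1 : y < 8) :
    (PySem.List.pyRange 0 8 1).map (fun j => if x - i > 0 ∧ x - i = j - y then '1' else '0')
      = upRightRow x y i := by
  unfold upRightRow
  exact row_eq (x - i) y h0 h1

-- ===== VERDICT (by name: the statement is the Claim_ definition above) =====
theorem up_right_spec : Claim_equal_up_right := by
  unfold Claim_equal_up_right Spec_up_right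
  intro pos _
  unfold up_right up_right_alt
  have hy0 : 0 ≤ PySem.Int.mod pos 8 := PySem.Int.mod_nonneg pos (by norm_num)
  have hy1 : PySem.Int.mod pos 8 < 8 := PySem.Int.mod_lt pos (by norm_num)
  set x := PySem.Int.floordiv pos 8 with hx
  set y := PySem.Int.mod pos 8 with hy
  have hinner : ∀ (i : Int) (bs : List Char),
      (PySem.List.pyRange 0 8 1).foldl
        (fun bs j => if x - i > 0 ∧ x - i = j - y then bs ++ ['1'] else bs ++ ['0']) bs
        = bs ++ (PySem.List.pyRange 0 8 1).map (fun j => if x - i > 0 ∧ x - i = j - y then '1' else '0') := by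
    intro i bs
    have hc : (fun (bs : List Char) (j : Int) =>
        if x - i > 0 ∧ x - i = j - y then bs ++ ['1'] else bs ++ ['0'])
        = fun bs j => bs ++ [if x - i > 0 ∧ x - i = j - y then '1' else '0'] := by
      funext bs j
      by_cases h : x - i > 0 ∧ x - i = j - y
      · rw [if_pos h, if_pos h]
      · rw [if_neg h, if_neg h]
    rw [hc, PySem.List.foldl_append_singleton_eq_map]
  simp only [hinner]
  rw [PySem.List.foldl_append_eq_flatMap, PySem.List.foldl_append_singleton_eq_map,
      List.nil_append, List.nil_append, join_nil_eq_flatten, List.flatMap_def]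
  exact congrArg String.ofList (congrArg List.flatten
    (List.map_congr_left (fun i _ => row_eq' x y i hy0 hy1)))
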